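-- pv_equiv track=rewrite | github.com/Whitecki/ASD | Dynamiki/MIT/R3.Treasureship!.py | statki
-- ===== SOURCE A (Python) =====
-- def statki(T: "tablica pionowa rozmiaru n o szerokości 2, na każdym polu jest wartość"):
--     n = len(T)
--     # subproblems: dp[i,j] największa wartość kaski możliwej do zgarnięcia od 0 do i lub j
--     po_rowno = [0 for _ in range(n)]  # największa wartość, jeśli ostatni statek jest położony poziomo
--     po_lewej_klade = [0 for _ in
--                       range(n)]  # największa wartość, jeśli ostatnia łódka jest położona pionowo po lewej stronie
--     po_prawej_klade = [0 for _ in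
--                        range(n)]  # największa wartość, jeśli ostatnia łódka jest położona pionowo po prawej stronie
--     # base case: stawiam na polu o wymiarach 2x1 łódkę poziomo, jesli się to opłaca
--     if T[0][0] + T[0][1] > 0:
--         po_rowno[0] += T[0][0] + T[0][1]
--     if T[1][0] + T[1][1] > 0:
--         po_rowno[1] = po_rowno[0] + T[1][0] + T[1][1]
--     if T[0][0] + T[1][0] > 0:
--         po_lewej_klade[1] = T[0][0] + T[1][0]
--     if T[0][1] + T[1][1] > 0:
--         po_prawej_klade[1] = T[0][1] + T[1][1]
--
--     # wiersz po wierszu dodajemy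
--     for i in range(2, n):
--         # jeżeli się to opłaca, to stawiam poziomo statek
--         po_rowno[i] = max(max(po_rowno[i - 1], po_lewej_klade[i - 1], po_prawej_klade[i - 1]) + T[i][0] + T[i][1],
--                           po_rowno[i - 1])
--
--         # jeśli położenie pionowo łódki po prawo, da wartość dodaną, to kładę ją
--         po_prawej_klade[i] = max(
--             max(po_rowno[i - 2], po_lewej_klade[i - 1], po_prawej_klade[i - 2]) + T[i][1] + T[i - 1][1],
--             po_prawej_klade[i - 1])
--
--         # jeśli położenie pionowo łódki po lewo, da wartość dodaną, to kładę ją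
--         po_lewej_klade[i] = max(
--             max(po_lewej_klade[i - 2], po_prawej_klade[i - 1], po_rowno[i - 2]) + T[i][0] + T[i - 1][0],
--             po_lewej_klade[i - 1])
--
--     return max(po_rowno[n - 1], po_prawej_klade[n - 1], po_lewej_klade[n - 1])
-- ===== SOURCE B (Python) =====
-- def statki(T: "tablica pionowa rozmiaru n o szerokości 2, na każdym polu jest wartość"):
--     # top-down memoized recursion: f(i) = (po_rowno, po_lewej, po_prawej) for row i
--     memo = {}
--
--     def f(i):
--         if i in memo:
--             return memo[i]
--         if i == 0:
--             s = T[0][0] + T[0][1]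
--             res = (s if s > 0 else 0, 0, 0)
--         elif i == 1:
--             r0 = f(0)[0]
--             s = T[1][0] + T[1][1]
--             lv = T[0][0] + T[1][0]
--             pv = T[0][1] + T[1][1]
--             res = (r0 + s if s > 0 else 0, lv if lv > 0 else 0, pv if pv > 0 else 0)
--         else:
--             r1, l1, p1 = f(i - 1)
--             r2, l2, p2 = f(i - 2)
--             r = max(max(r1, l1, p1) + T[i][0] + T[i][1], r1)
--             p = max(max(r2, l1, p2) + T[i][1] + T[i - 1][1], p1)
--             l = max(max(l2, p1, r2) + T[i][0] + T[i - 1][0], l1)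
--             res = (r, l, p)
--         memo[i] = res
--         return res
--
--     return max(f(len(T) - 1))
-- ===== Notes on version B (the rewrite author's own statement) =====
-- stated objective: alternative
-- what changed: Replaces the bottom-up loop filling three index-addressed DP arrays by a top-down memoized recursion f(i) returning the per-row state triple, with the final answer max(f(n-1)).
import Mathlib
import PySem

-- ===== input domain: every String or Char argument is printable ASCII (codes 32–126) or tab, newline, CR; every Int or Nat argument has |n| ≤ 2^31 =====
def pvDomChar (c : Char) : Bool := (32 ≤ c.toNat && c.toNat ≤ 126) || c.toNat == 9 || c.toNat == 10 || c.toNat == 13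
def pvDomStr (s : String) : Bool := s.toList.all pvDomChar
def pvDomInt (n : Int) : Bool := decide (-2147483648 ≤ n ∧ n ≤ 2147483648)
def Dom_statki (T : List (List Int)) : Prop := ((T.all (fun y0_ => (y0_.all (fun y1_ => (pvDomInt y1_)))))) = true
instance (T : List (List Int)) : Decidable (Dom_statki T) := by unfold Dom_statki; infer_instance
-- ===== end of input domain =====

-- ===== PORT A =====
-- B replaces the bottom-up array DP by a top-down memoized recursion over the row index.
def pvMax3 (a b c : Int) : Int := max (max a b) c

-- literal port of A: three arrays updated in a loop over range(2, n); all indices are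
-- provably in range under Pre_statki, so reads use getD 0 (exact there).
def statkiStep (T : List (List Int)) (st : List Int × List Int × List Int) (i : Nat) :
    List Int × List Int × List Int :=
  let t : Nat → Nat → Int := fun a b => (T.getD a []).getD b 0
  let r := st.1
  let l := st.2.1
  let p := st.2.2
  let r' := r.set i (max (pvMax3 (r.getD (i-1) 0) (l.getD (i-1) 0) (p.getD (i-1) 0) + t i 0 + t i 1)
                        (r.getD (i-1) 0))
  let p' := p.set i (max (pvMax3 (r'.getD (i-2) 0) (l.getD (i-1) 0) (p.getD (i-2) 0) + t i 1 + t (i-1) 1)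
                        (p.getD (i-1) 0))
  let l' := l.set i (max (pvMax3 (l.getD (i-2) 0) (p'.getD (i-1) 0) (r'.getD (i-2) 0) + t i 0 + t (i-1) 0)
                        (l.getD (i-1) 0))
  (r', l', p')

def statki (T : List (List Int)) : Int :=
  let n := T.length
  let t : Nat → Nat → Int := fun a b => (T.getD a []).getD b 0
  let po_rowno := List.replicate n (0:Int)
  let po_lewej := List.replicate n (0:Int)
  let po_prawej := List.replicate n (0:Int)
  let po_rowno := if t 0 0 + t 0 1 > 0 then po_rowno.set 0 (t 0 0 + t 0 1) else po_rowno
  let po_rowno := if t 1 0 + t 1 1 > 0 then po_rowno.set 1 (po_rowno.getD 0 0 + t 1 0 + t 1 1) else po_rowno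
  let po_lewej := if t 0 0 + t 1 0 > 0 then po_lewej.set 1 (t 0 0 + t 1 0) else po_lewej
  let po_prawej := if t 0 1 + t 1 1 > 0 then po_prawej.set 1 (t 0 1 + t 1 1) else po_prawej
  let st := (List.range' 2 (n - 2)).foldl (statkiStep T) (po_rowno, po_lewej, po_prawej)
  pvMax3 (st.1.getD (n-1) 0) (st.2.2.getD (n-1) 0) (st.2.1.getD (n-1) 0)

-- ===== PORT B =====
-- port of B's memoized helper f(i) = (po_rowno, po_lewej, po_prawej) for row i, as
-- structural recursion on i (memoization only changes running time, not values).
def gB (T : List (List Int)) : Nat → Int × Int × Int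
  | 0 =>
    let t : Nat → Nat → Int := fun a b => (T.getD a []).getD b 0
    let s := t 0 0 + t 0 1
    (if s > 0 then s else 0, 0, 0)
  | 1 =>
    let t : Nat → Nat → Int := fun a b => (T.getD a []).getD b 0
    let r0 := (gB T 0).1
    let s := t 1 0 + t 1 1
    let lv := t 0 0 + t 1 0
    let pv := t 0 1 + t 1 1
    (if s > 0 then r0 + s else 0, if lv > 0 then lv else 0, if pv > 0 then pv else 0)
  | (i+2) =>
    let t : Nat → Nat → Int := fun a b => (T.getD a []).getD b 0
    let q1 := gB T (i+1)
    let q2 := gB T i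
    (max (pvMax3 q1.1 q1.2.1 q1.2.2 + t (i+2) 0 + t (i+2) 1) q1.1,
     max (pvMax3 q2.2.1 q1.2.2 q2.1 + t (i+2) 0 + t (i+1) 0) q1.2.1,
     max (pvMax3 q2.1 q1.2.1 q2.2.2 + t (i+2) 1 + t (i+1) 1) q1.2.2)

def statki_alt (T : List (List Int)) : Int :=
  let tr := gB T (T.length - 1)
  pvMax3 tr.1 tr.2.1 tr.2.2

-- ===== PRECONDITION & SPEC =====
-- Pre_ excludes exactly the inputs where Python A raises IndexError: fewer than 2 rows, or some row shorter than 2.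
def Pre_statki (T : List (List Int)) : Prop := 2 ≤ T.length ∧ ∀ row ∈ T, 2 ≤ row.length
instance (T : List (List Int)) : Decidable (Pre_statki T) := by unfold Pre_statki; infer_instance
def pvWitness_statki : List (List Int) := [[1, -2], [3, 4], [-1, 5]]
def Spec_statki (T : List (List Int)) (out : Int) : Prop := out = statki_alt T
instance (T : List (List Int)) (out : Int) : Decidable (Spec_statki T out) := by unfold Spec_statki; infer_instance

-- ===== CLAIM (what is proved, stated in full; the proofs are below) =====
def Claim_equal_statki : Prop := ∀ (T : List (List Int)), Dom_statki T → Pre_statki T → Spec_statki T (statki T)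

-- ===== LEMMAS AND PROOFS =====
lemma pv_getD_set_self (xs : List Int) (i : Nat) (v : Int) (h : i < xs.length) :
    (xs.set i v).getD i 0 = v := by
  simp [List.getD_eq_getElem?_getD, h]

lemma pv_getD_set_ne (xs : List Int) (i j : Nat) (v : Int) (h : i ≠ j) :
    (xs.set i v).getD j 0 = xs.getD j 0 := by
  simp [List.getD_eq_getElem?_getD, List.getElem?_set_ne, h]

-- the initial arrays of A (the four guarded base-case writes)
def pvInitA (T : List (List Int)) : List Int × List Int × List Int :=
  let n := T.length
  let t : Nat → Nat → Int := fun a b => (T.getD a []).getD b 0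
  let po_rowno := List.replicate n (0:Int)
  let po_lewej := List.replicate n (0:Int)
  let po_prawej := List.replicate n (0:Int)
  let po_rowno := if t 0 0 + t 0 1 > 0 then po_rowno.set 0 (t 0 0 + t 0 1) else po_rowno
  let po_rowno := if t 1 0 + t 1 1 > 0 then po_rowno.set 1 (po_rowno.getD 0 0 + t 1 0 + t 1 1) else po_rowno
  let po_lewej := if t 0 0 + t 1 0 > 0 then po_lewej.set 1 (t 0 0 + t 1 0) else po_lewej
  let po_prawej := if t 0 1 + t 1 1 > 0 then po_prawej.set 1 (t 0 1 + t 1 1) else po_prawej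
  (po_rowno, po_lewej, po_prawej)

lemma statki_unfold (T : List (List Int)) :
    statki T =
      (fun st => pvMax3 (st.1.getD (T.length-1) 0) (st.2.2.getD (T.length-1) 0) (st.2.1.getD (T.length-1) 0))
        ((List.range' 2 (T.length - 2)).foldl (statkiStep T) (pvInitA T)) := rfl

def pvOK (T : List (List Int)) (k : Nat) (st : List Int × List Int × List Int) : Prop :=
  st.1.length = T.length ∧ st.2.1.length = T.length ∧ st.2.2.length = T.length ∧
  st.1.getD (k+1) 0 = (gB T (k+1)).1 ∧ st.1.getD k 0 = (gB T k).1 ∧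
  st.2.1.getD (k+1) 0 = (gB T (k+1)).2.1 ∧ st.2.1.getD k 0 = (gB T k).2.1 ∧
  st.2.2.getD (k+1) 0 = (gB T (k+1)).2.2 ∧ st.2.2.getD k 0 = (gB T k).2.2

lemma statkiStep_ok (T : List (List Int)) (k : Nat) (st : List Int × List Int × List Int)
    (hlt : k + 2 < T.length) (h : pvOK T k st) : pvOK T (k+1) (statkiStep T st (2+k)) := by
  obtain ⟨r, l, p⟩ := st
  obtain ⟨hl1, hl2, hl3, e1, e2, e3, e4, e5, e6⟩ := h
  unfold pvOK statkiStep
  simp only [show 2 + k = k + 2 from by omega, show k + 2 - 1 = k + 1 from by omega,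
    show k + 2 - 2 = k from by omega, show k + 1 + 1 = k + 2 from by omega]
  simp only at hl1 hl2 hl3 e1 e2 e3 e4 e5 e6
  refine ⟨?_, ?_, ?_, ?_, ?_, ?_, ?_, ?_, ?_⟩
  · simpa using hl1
  · simpa using hl2
  · simpa using hl3
  · rw [pv_getD_set_self _ _ _ (by rw [hl1]; exact hlt), e1, e3, e5]
    simp [gB]
  · rw [pv_getD_set_ne _ _ _ _ (by omega), e1]
  · rw [pv_getD_set_self _ _ _ (by rw [hl2]; exact hlt),
      pv_getD_set_ne _ _ _ _ (by omega : k + 2 ≠ k + 1),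
      pv_getD_set_ne _ _ _ _ (by omega : k + 2 ≠ k), e2, e3, e4, e5]
    simp [gB]
  · rw [pv_getD_set_ne _ _ _ _ (by omega), e3]
  · rw [pv_getD_set_self _ _ _ (by rw [hl3]; exact hlt),
      pv_getD_set_ne _ _ _ _ (by omega : k + 2 ≠ k), e2, e3, e5, e6]
    simp [gB]
  · rw [pv_getD_set_ne _ _ _ _ (by omega), e5]

lemma invA (T : List (List Int)) (h2 : 2 ≤ T.length) :
    ∀ k, k + 2 ≤ T.length →
      pvOK T k ((List.range' 2 k).foldl (statkiStep T) (pvInitA T)) := by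
  intro k
  induction k with
  | zero =>
    intro _
    have h1 : 1 < T.length := by omega
    unfold pvOK pvInitA
    simp only [List.range'_zero, List.foldl_nil, gB]
    refine ⟨?_, ?_, ?_, ?_, ?_, ?_, ?_, ?_, ?_⟩ <;>
      split_ifs <;>
      simp_all [List.length_set, List.length_replicate] <;>
      (try rw [List.getElem?_set_self (by simp; omega)]) <;> simp <;> ring
  | succ k ih =>
    intro hk
    have hconcat : List.range' 2 (k+1) = List.range' 2 k ++ [2+k] := by
      simp [List.range'_concat]
    rw [hconcat, List.foldl_append, List.foldl_cons, List.foldl_nil]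
    exact statkiStep_ok T k _ (by omega) (ih (by omega))

lemma statkiA_eq_g (T : List (List Int)) (h2 : 2 ≤ T.length) :
    statki T = pvMax3 (gB T (T.length-1)).1 (gB T (T.length-1)).2.2 (gB T (T.length-1)).2.1 := by
  have h := invA T h2 (T.length - 2) (by omega)
  obtain ⟨_, _, _, e1, _, e3, _, e5, _⟩ := h
  have hn : T.length - 2 + 1 = T.length - 1 := by omega
  rw [statki_unfold]
  simp only []
  rw [hn] at e1 e3 e5
  rw [e1, e3, e5]

-- ===== VERDICT (by name: the statement is the Claim_ definition above) =====
theorem statki_spec : Claim_equal_statki := by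
  intro T _ hPre
  unfold Spec_statki statki_alt
  rw [statkiA_eq_g T hPre.1]
  unfold pvMax3
  exact (max_right_comm _ _ _).symm
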